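-- pv_equiv track=rewrite | github.com/z3ro7706/Gist_z3ro | Code/Algorithm/2nd_recursion_2025/Q4.py | StringPeriods
-- ===== SOURCE A (Python) =====
-- def StringPeriods(word:str,a:int,key:list):
--     arr=list(word)
--
--     if(a>=len(arr)):
--         return key
--
--     if(Judgment(arr,a) is True):
--         return StringPeriods(arr,a+1,arr[:a])
--
--     else:
--         return StringPeriods(arr,a+1,key)
--
-- def Judgment(arr:list,length:int):
--     if((len(arr)%length)!=0):
--         return False
--
--     for i in range(0,len(arr)):
--         if(arr[i]!=arr[i%length]):
--             return False
--     return True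
-- ===== SOURCE B (Python) =====
-- def StringPeriods(word, a, key):
--     n = len(word)
--     for p in range(n - 1, max(a, 1) - 1, -1):
--         if n % p == 0 and word[:p] * (n // p) == word:
--             return list(word[:p])
--     return key
-- ===== Notes on version B (the rewrite author's own statement) =====
-- stated objective: faster
-- what changed: Replaces A's ascending recursion, which re-scans the whole string for every candidate prefix length, with a single descending loop over candidate lengths that returns at the first (= largest) divisor length whose prefix replication rebuilds the word.
-- outside the precondition, e.g. on StringPeriods('', -3, ['k']): A returns [], B returns ['k']
import Mathlib
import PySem

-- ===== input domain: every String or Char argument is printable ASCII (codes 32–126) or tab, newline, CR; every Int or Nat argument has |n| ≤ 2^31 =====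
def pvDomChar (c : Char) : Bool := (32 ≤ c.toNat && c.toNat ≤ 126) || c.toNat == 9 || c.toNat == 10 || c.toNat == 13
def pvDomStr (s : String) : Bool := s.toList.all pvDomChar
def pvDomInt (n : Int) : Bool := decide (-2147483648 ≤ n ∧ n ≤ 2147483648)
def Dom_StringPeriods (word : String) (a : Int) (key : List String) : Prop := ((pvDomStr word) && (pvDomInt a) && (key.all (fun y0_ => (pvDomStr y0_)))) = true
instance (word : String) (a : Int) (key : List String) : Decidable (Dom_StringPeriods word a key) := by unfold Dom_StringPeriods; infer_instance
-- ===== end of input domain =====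

-- B replaces A's ascending quadratic rescan of every prefix length by a single descending
-- scan over divisor lengths with a prefix-replication check (first hit = largest period).

-- ===== PORT A =====
-- list(word) yields one-character strings; this is that element conversion.
def pvChr (c : Char) : String := String.ofList [c]

-- Python's Judgment(arr, length); inside Pre_ it is only called with length ≥ 1,
-- so len(arr) % length never divides by zero and every index is in range.
def Judgment (arr : List String) (length : Int) : Bool :=
  if PySem.Int.mod (arr.length : Int) length ≠ 0 then false
  else (PySem.List.pyRange 0 (arr.length : Int) 1).all
        (fun i => PySem.List.pyGetD arr i "" == PySem.List.pyGetD arr (PySem.Int.mod i length) "")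

-- A's recursion; after the first call word is always the same list, ported as `arr`.
def StringPeriodsRec (arr : List String) (a : Int) (key : List String) : List String :=
  if (arr.length : Int) ≤ a then key
  else if Judgment arr a then
    StringPeriodsRec arr (a + 1) (PySem.List.slice arr none (some a))
  else
    StringPeriodsRec arr (a + 1) key
termination_by ((arr.length : Int) - a).toNat
decreasing_by all_goals omega

def StringPeriods (word : String) (a : Int) (key : List String) : List String :=
  StringPeriodsRec (word.toList.map pvChr) a key

-- ===== PORT B =====
-- n % p == 0 and word[:p] * (n // p) == word
def pvCheck (cs : List Char) (p : Int) : Bool :=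
  PySem.Int.mod (cs.length : Int) p == 0 &&
  (List.replicate (PySem.Int.floordiv (cs.length : Int) p).toNat
      (PySem.List.slice cs none (some p))).flatten == cs

def StringPeriods_alt (word : String) (a : Int) (key : List String) : List String :=
  match (PySem.List.pyRange ((word.toList.length : Int) - 1) (max a 1 - 1) (-1)).find?
      (fun p => pvCheck word.toList p) with
  | some p => (PySem.List.slice word.toList none (some p)).map pvChr
  | none => key

-- ===== PRECONDITION & SPEC =====
-- Pre_ excludes a ≤ 0 with nonempty word, where A raises ZeroDivisionError, and a < 0 with
-- empty word, where A either exceeds the recursion limit or, as an artefact of the vacuous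
-- period check on the way up to 0, overwrites key with [].
def Pre_StringPeriods (word : String) (a : Int) (key : List String) : Prop :=
  1 ≤ a ∨ (a = 0 ∧ word = "")
instance (word : String) (a : Int) (key : List String) : Decidable (Pre_StringPeriods word a key) := by unfold Pre_StringPeriods; infer_instance
def pvWitness_StringPeriods : String × Int × List String := ("abab", 1, ["z"])

def Spec_StringPeriods (word : String) (a : Int) (key : List String) (out : List String) : Prop := out = StringPeriods_alt word a key
instance (word : String) (a : Int) (key : List String) (out : List String) : Decidable (Spec_StringPeriods word a key out) := by unfold Spec_StringPeriods; infer_instance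

-- ===== CLAIM (what is proved, stated in full; the proofs are below) =====
def Claim_equal_StringPeriods : Prop := ∀ (word : String) (a : Int) (key : List String), Dom_StringPeriods word a key → Pre_StringPeriods word a key → Spec_StringPeriods word a key (StringPeriods word a key)

-- ===== LEMMAS AND PROOFS =====

-- find? respects a pointwise-equal predicate (no such congruence lemma is in the library)
theorem find?_congr_mem {α : Type} (l : List α) (p q : α → Bool)
    (h : ∀ x ∈ l, p x = q x) : l.find? p = l.find? q := by
  induction l with
  | nil => rfl
  | cons x xs ih =>
    simp only [List.find?_cons]
    rw [h x (by simp)]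
    cases q x
    · exact ih (fun y hy => h y (by simp [hy]))
    · rfl

theorem pvChr_inj (a b : Char) (h : pvChr a = pvChr b) : a = b := by
  have := congrArg String.toList h
  simpa [pvChr] using this

-- indexing the flattening of replicated copies of a nonempty block
theorem repFlatten_getElem? {α : Type} (l : List α) :
    ∀ (k i : Nat), ((List.replicate k l).flatten)[i]? =
      if i < k * l.length then l[i % l.length]? else none := by
  intro k
  induction k with
  | zero => intro i; simp
  | succ k ih =>
    intro i
    rw [List.replicate_succ, List.flatten_cons]
    by_cases hi : i < l.length
    · rw [List.getElem?_append_left hi, if_pos (by calc i < l.length := hi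
        _ ≤ (k+1) * l.length := by nlinarith), Nat.mod_eq_of_lt hi]
    · rw [Nat.not_lt] at hi
      rw [List.getElem?_append_right hi, ih (i - l.length),
        Nat.mod_eq_sub_mod hi]
      have hmul : (k + 1) * l.length = k * l.length + l.length := by ring
      by_cases h2 : i - l.length < k * l.length
      · rw [if_pos h2, if_pos (by omega)]
      · rw [if_neg h2, if_neg (by omega)]

-- the replication check is the pointwise period condition (for a block of positive length)
theorem repFlatten_eq_iff (cs : List Char) (q : Nat) (hq : 0 < q) (hqn : q ≤ cs.length)
    (hd : q ∣ cs.length) :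
    ((List.replicate (cs.length / q) (cs.take q)).flatten = cs ↔
      ∀ i, (h : i < cs.length) → cs[i] = cs[i % q]'(by
        exact Nat.lt_of_lt_of_le (Nat.mod_lt _ hq) hqn)) := by
  have hlen : (cs.take q).length = q := by simp [List.length_take]; omega
  have hmul : (cs.length / q) * q = cs.length := Nat.div_mul_cancel hd
  constructor
  · intro hrep i h
    have hm : i % q < q := Nat.mod_lt _ hq
    have h1 := repFlatten_getElem? (cs.take q) (cs.length / q) i
    rw [hrep, hlen, hmul, if_pos h, List.getElem?_take_of_lt (by omega)] at h1
    rw [List.getElem?_eq_getElem h, List.getElem?_eq_getElem (by omega)] at h1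
    simpa using h1
  · intro hpt
    apply List.ext_getElem?
    intro i
    rw [repFlatten_getElem? (cs.take q) (cs.length / q) i, hlen, hmul]
    by_cases h : i < cs.length
    · have hm : i % q < q := Nat.mod_lt _ hq
      rw [if_pos h, List.getElem?_take_of_lt (by omega),
        List.getElem?_eq_getElem h, List.getElem?_eq_getElem (by omega)]
      exact congrArg some (hpt i h).symm
    · rw [if_neg h, eq_comm, List.getElem?_eq_none_iff]
      omega

-- A's Judgment agrees with B's check for 1 ≤ p < n
theorem judgment_eq_check (cs : List Char) (p : Int) (hp : 1 ≤ p)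
    (hpn : p < (cs.length : Int)) :
    Judgment (cs.map pvChr) p = pvCheck cs p := by
  obtain ⟨q, rfl⟩ : ∃ q : Nat, p = (q : Int) := ⟨p.toNat, by omega⟩
  have hq : 0 < q := by exact_mod_cast hp
  have hqn : q < cs.length := by exact_mod_cast hpn
  unfold Judgment pvCheck
  simp only [List.length_map, PySem.Int.mod_natCast, PySem.List.slice_to_natCast]
  by_cases hd : cs.length % q = 0
  · have hdvd : q ∣ cs.length := Nat.dvd_of_mod_eq_zero hd
    rw [if_neg (by simp [hd]), hd]
    simp only [Nat.cast_zero, beq_self_eq_true, Bool.true_and]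
    have hfd : (PySem.Int.floordiv (cs.length : Int) (q : Int)).toNat = cs.length / q := by
      rw [PySem.Int.floordiv_natCast, Int.toNat_natCast]
    rw [hfd]
    rw [Bool.eq_iff_iff, List.all_eq_true, beq_iff_eq]
    rw [repFlatten_eq_iff cs q hq (by omega) hdvd]
    constructor
    · intro hall i hi
      have := hall (i : Int) (by rw [PySem.List.mem_pyRange_one]; omega)
      rw [beq_iff_eq, PySem.Int.mod_natCast] at this
      have hm : i % q < cs.length := by
        have := Nat.mod_lt i hq; omega
      rw [PySem.List.pyGetD_natCast, PySem.List.pyGetD_natCast,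
        List.getD_eq_getElem _ _ (by simpa using hi),
        List.getD_eq_getElem _ _ (by simpa using hm)] at this
      simp only [List.getElem_map] at this
      exact pvChr_inj _ _ this
    · intro hpt x hx
      rw [PySem.List.mem_pyRange_one] at hx
      obtain ⟨i, rfl⟩ : ∃ i : Nat, x = (i : Int) := ⟨x.toNat, by omega⟩
      have hi : i < cs.length := by exact_mod_cast hx.2
      have hm : i % q < cs.length := by
        have := Nat.mod_lt i hq; omega
      rw [beq_iff_eq, PySem.Int.mod_natCast, PySem.List.pyGetD_natCast,
        PySem.List.pyGetD_natCast,
        List.getD_eq_getElem _ _ (by simpa using hi),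
        List.getD_eq_getElem _ _ (by simpa using hm)]
      simp only [List.getElem_map]
      exact congrArg pvChr (hpt i hi)
  · rw [if_pos ((by exact_mod_cast hd) : ((cs.length % q : Nat) : Int) ≠ 0)]
    rw [eq_comm, Bool.and_eq_false_iff]
    left
    rw [beq_eq_false_iff_ne]
    exact_mod_cast hd

-- A's recursion returns the prefix of the LARGEST accepted length in [a, n), else key;
-- stated via the descending range's first hit.
theorem spRec_eq (arr : List String) : ∀ (k : Nat) (a : Int) (key : List String),
    ((arr.length : Int) - a).toNat = k →
    StringPeriodsRec arr a key =
      match (PySem.List.pyRange ((arr.length : Int) - 1) (a - 1) (-1)).find?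
          (fun p => Judgment arr p) with
      | some p => PySem.List.slice arr none (some p)
      | none => key := by
  intro k
  induction k with
  | zero =>
    intro a key hk
    rw [StringPeriodsRec, if_pos (by omega),
      PySem.List.pyRange_neg_one_eq_nil (by omega)]
    rfl
  | succ k ih =>
    intro a key hk
    have ha : a < (arr.length : Int) := by omega
    rw [StringPeriodsRec, if_neg (by omega)]
    have hsplit : PySem.List.pyRange ((arr.length : Int) - 1) (a - 1) (-1) =
        PySem.List.pyRange ((arr.length : Int) - 1) a (-1) ++ [a] := by
      rw [PySem.List.pyRange_neg_one_eq_reverse, PySem.List.pyRange_neg_one_eq_reverse,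
        PySem.List.pyRange_one_cons (by omega)]
      simp
    rw [hsplit, List.find?_append]
    have htail : PySem.List.pyRange ((arr.length : Int) - 1) a (-1) =
        PySem.List.pyRange ((arr.length : Int) - 1) ((a + 1) - 1) (-1) := by norm_num
    cases hfind : (PySem.List.pyRange ((arr.length : Int) - 1) a (-1)).find?
        (fun p => Judgment arr p) with
    | some p =>
      have h1 := ih (a + 1) (PySem.List.slice arr none (some a)) (by omega)
      have h2 := ih (a + 1) key (by omega)
      rw [← htail, hfind] at h1 h2
      cases hJ : Judgment arr a
      · rw [if_neg (by simp [hJ]), h2]; rfl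
      · rw [if_pos (by simp [hJ]), h1]; rfl
    | none =>
      have h1 := ih (a + 1) (PySem.List.slice arr none (some a)) (by omega)
      have h2 := ih (a + 1) key (by omega)
      rw [← htail, hfind] at h1 h2
      cases hJ : Judgment arr a
      · rw [if_neg (by simp [hJ]), h2]
        simp [Option.or, List.find?, hJ]
      · rw [if_pos (by simp [hJ]), h1]
        simp [Option.or, List.find?, hJ]

theorem slice_map_comm (cs : List Char) (q : Nat) :
    PySem.List.slice (cs.map pvChr) none (some (q : Int)) =
      (PySem.List.slice cs none (some (q : Int))).map pvChr := by
  rw [PySem.List.slice_to_natCast, PySem.List.slice_to_natCast, List.map_take]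

-- ===== VERDICT (by name: the statement is the Claim_ definition above) =====
theorem StringPeriods_spec : Claim_equal_StringPeriods := by
  intro word a key _hdom hpre
  unfold Spec_StringPeriods StringPeriods StringPeriods_alt
  set cs := word.toList with hcs
  set arr := cs.map pvChr with harr
  have hlen : (arr.length : Int) = (cs.length : Int) := by simp [harr]
  rcases hpre with ha1 | ⟨ha0, hw⟩
  · -- a ≥ 1 : the two scans run over the same range with pointwise-equal tests
    have hmax : max a 1 - 1 = a - 1 := by omega
    rw [spRec_eq arr _ a key rfl, hlen, hmax]
    rw [find?_congr_mem _ _ (fun p => pvCheck cs p) (fun p hp => by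
      rw [PySem.List.mem_pyRange_neg_one] at hp
      exact judgment_eq_check cs p (by omega) (by omega))]
    cases hfind : (PySem.List.pyRange ((cs.length : Int) - 1) (a - 1) (-1)).find?
        (fun p => pvCheck cs p) with
    | some p =>
      have hp := List.mem_of_find?_eq_some hfind
      rw [PySem.List.mem_pyRange_neg_one] at hp
      obtain ⟨q, rfl⟩ : ∃ q : Nat, p = (q : Int) := ⟨p.toNat, by omega⟩
      exact slice_map_comm cs q
    | none => rfl
  · -- a = 0 and word = "" : both sides return key at once
    subst ha0
    have hnil : cs = [] := by rw [hcs, hw]; rfl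
    rw [spRec_eq arr _ 0 key rfl]
    rw [PySem.List.pyRange_neg_one_eq_nil (by rw [hlen, hnil]; norm_num),
      PySem.List.pyRange_neg_one_eq_nil (by rw [hnil]; norm_num)]
    rfl
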